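-- pv_equiv track=rewrite | github.com/Topinambour493/dicoco | dicocoApiV2/app/utils.py | anagram_minus
-- ===== SOURCE A (Python) =====
-- def anagram_minus(word, pattern):
--     if pattern == "":
--         return True
--     pattern = list(pattern)
--     if len(word) > len(pattern):
--         return False
--     for letter in word:
--         if letter in pattern:
--             pattern.remove(letter)
--         else:
--             return False
--     return True
-- ===== SOURCE B (Python) =====
-- def anagram_minus(word, pattern):
--     if pattern == "":
--         return True
--     return all(word.count(c) <= pattern.count(c) for c in set(word))
-- ===== Notes on version B (the rewrite author's own statement) =====
-- stated objective: faster
-- what changed: Replaces the length guard plus destructive scan-and-remove loop over a list copy of pattern by a per-distinct-letter count comparison (all(word.count(c) <= pattern.count(c) for c in set(word))), keeping A's explicit empty-pattern guard.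
import Mathlib
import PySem

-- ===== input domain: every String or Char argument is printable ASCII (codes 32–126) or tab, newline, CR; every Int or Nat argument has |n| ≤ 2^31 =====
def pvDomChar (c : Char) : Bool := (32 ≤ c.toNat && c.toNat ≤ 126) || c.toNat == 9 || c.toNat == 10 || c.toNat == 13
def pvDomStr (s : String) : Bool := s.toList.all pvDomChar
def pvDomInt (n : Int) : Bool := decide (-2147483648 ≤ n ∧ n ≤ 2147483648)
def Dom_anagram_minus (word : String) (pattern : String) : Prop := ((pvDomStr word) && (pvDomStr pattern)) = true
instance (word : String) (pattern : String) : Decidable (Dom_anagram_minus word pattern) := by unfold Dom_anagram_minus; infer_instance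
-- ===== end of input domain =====

-- B replaces A's destructive scan-and-remove loop by a per-distinct-letter count comparison (simpler; A's explicit empty-pattern guard is kept).

-- ===== PORT A =====
-- the for-loop: 'letter in pattern' is list membership, 'pattern.remove(letter)' erases the first occurrence
def anagramLoop : List Char → List Char → Bool
  | [], _ => true
  | c :: rest, p => if p.contains c then anagramLoop rest (p.erase c) else false

def anagram_minus (word : String) (pattern : String) : Bool :=
  if pattern.toList.isEmpty then true
  else
    let plist := pattern.toList
    if word.toList.length > plist.length then false
    else anagramLoop word.toList plist

-- ===== PORT B =====
def anagram_minus_alt (word : String) (pattern : String) : Bool :=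
  if pattern.toList.isEmpty then true
  else (PySem.Set.ofList word.toList).all
    (fun c => word.toList.count c ≤ pattern.toList.count c)

-- ===== PRECONDITION & SPEC =====
def Spec_anagram_minus (word : String) (pattern : String) (out : Bool) : Prop := out = anagram_minus_alt word pattern
instance (word : String) (pattern : String) (out : Bool) : Decidable (Spec_anagram_minus word pattern out) := by unfold Spec_anagram_minus; infer_instance

-- ===== CLAIM (what is proved, stated in full; the proofs are below) =====
def Claim_equal_anagram_minus : Prop := ∀ (word : String) (pattern : String), Dom_anagram_minus word pattern → Spec_anagram_minus word pattern (anagram_minus word pattern)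

-- ===== LEMMAS AND PROOFS =====

theorem anagramLoop_iff (w : List Char) : ∀ (p : List Char),
    anagramLoop w p = true ↔ ∀ c, w.count c ≤ p.count c := by
  induction w with
  | nil => intro p; simp [anagramLoop]
  | cons c rest ih =>
    intro p
    by_cases hc : c ∈ p
    · simp only [anagramLoop, List.contains_eq_mem, hc, decide_true, if_true, ih]
      have hpos : 1 ≤ p.count c := List.one_le_count_iff.mpr hc
      constructor
      · intro h d
        have hd := h d
        rw [List.count_cons]
        by_cases hdc : d = c
        · subst hdc
          rw [List.count_erase_self] at hd
          simp only [beq_self_eq_true, if_true]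
          omega
        · rw [List.count_erase_of_ne hdc] at hd
          have hb : ¬ ((c == d) = true) := by simp; exact fun h => hdc h.symm
          rw [if_neg hb]
          omega
      · intro h d
        have hd := h d
        rw [List.count_cons] at hd
        by_cases hdc : d = c
        · subst hdc
          rw [List.count_erase_self]
          simp only [beq_self_eq_true, if_true] at hd
          omega
        · rw [List.count_erase_of_ne hdc]
          have hb : ¬ ((c == d) = true) := by simp; exact fun h => hdc h.symm
          rw [if_neg hb] at hd
          omega
    · simp only [anagramLoop, List.contains_eq_mem, hc, decide_false]
      constructor
      · intro h; exact absurd h (by simp)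
      · intro h
        have := h c
        rw [List.count_cons_self, List.count_eq_zero_of_not_mem hc] at this
        omega

theorem count_le_length {w p : List Char} (h : ∀ c, w.count c ≤ p.count c) :
    w.length ≤ p.length :=
  (List.subperm_ext_iff.mpr (fun x _ => h x)).length_le

theorem alt_iff (w p : List Char) :
    ((PySem.Set.ofList w).all (fun c => w.count c ≤ p.count c) = true)
      ↔ ∀ c, w.count c ≤ p.count c := by
  rw [List.all_eq_true]
  constructor
  · intro h c
    by_cases hc : c ∈ w
    · have := h c ((PySem.Set.mem_ofList _ _).mpr hc)
      simpa using this
    · rw [List.count_eq_zero_of_not_mem hc]; omega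
  · intro h c _
    simpa using h c

-- ===== VERDICT (by name: the statement is the Claim_ definition above) =====
theorem anagram_minus_spec : Claim_equal_anagram_minus := by
  intro word pattern _
  unfold Spec_anagram_minus anagram_minus anagram_minus_alt
  by_cases hp : pattern.toList.isEmpty
  · simp [hp]
  · simp only [hp, Bool.false_eq_true, if_false]
    rw [Bool.eq_iff_iff, alt_iff]
    by_cases hlen : word.toList.length > pattern.toList.length
    · simp only [hlen, if_true]
      constructor
      · intro h; exact absurd h (by simp)
      · intro h; exact absurd (count_le_length h) (by omega)
    · simp only [hlen, if_false]
      exact anagramLoop_iff _ _
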